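-- pv_equiv track=rewrite | github.com/venux021/soda | zcy2/c4/q14.py | card2
-- ===== SOURCE A (Python) =====
-- def card2(arr):
--     n = len(arr)
--     dpf = [[0] * n for i in range(n)]
--     dps = [[0] * n for i in range(n)]
--     for i in range(n):
--         dpf[i][i] = arr[i]
--     for k in range(1, n):
--         i = 0
--         j = k
--         while i < n and j < n:
--             dpf[i][j] = max(arr[i] + dps[i+1][j], arr[j] + dps[i][j-1])
--             dps[i][j] = min(dpf[i+1][j], dpf[i][j-1])
--             i += 1
--             j += 1
--     return max(dpf[0][n-1], dps[0][n-1])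
-- ===== SOURCE B (Python) =====
-- def card2(arr):
--     n = len(arr)
--     total = sum(arr)
--     d = list(arr)
--     for length in range(2, n + 1):
--         for i in range(n - length + 1):
--             d[i] = max(arr[i] - d[i + 1], arr[i + length - 1] - d[i])
--     first = (total + d[0]) // 2
--     return max(first, total - first)
-- ===== Notes on version B (the rewrite author's own statement) =====
-- stated objective: simpler
-- what changed: Replaces A's two n x n tables (first/second-player scores) by a single 1-D rolling minimax-difference array updated in place over increasing interval length, reconstructing both scores from the total sum at the end.
import Mathlib
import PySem

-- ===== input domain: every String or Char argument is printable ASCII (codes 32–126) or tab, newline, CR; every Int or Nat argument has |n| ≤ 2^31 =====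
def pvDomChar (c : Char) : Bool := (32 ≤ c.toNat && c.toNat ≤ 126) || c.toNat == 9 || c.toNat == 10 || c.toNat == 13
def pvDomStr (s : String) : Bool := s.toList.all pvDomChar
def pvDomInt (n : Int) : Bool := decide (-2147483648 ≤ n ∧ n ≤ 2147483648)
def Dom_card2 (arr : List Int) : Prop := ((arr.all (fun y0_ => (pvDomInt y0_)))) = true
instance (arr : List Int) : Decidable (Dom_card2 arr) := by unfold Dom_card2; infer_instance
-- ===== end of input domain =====

-- B replaces A's two n×n score tables by one in-place 1-D minimax-difference array plus a
-- reconstruction from the total sum (simpler, O(n) instead of O(n^2) space).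

-- ===== PORT A =====
-- 2-D table access: the indices A uses are always in range on the admitted inputs,
-- so getD/set with defaults 0/[] is exact there.
def pvGet2 (t : List (List Int)) (i j : Nat) : Int := (t.getD i []).getD j 0

def pvSet2 (t : List (List Int)) (i j : Nat) (v : Int) : List (List Int) :=
  t.set i ((t.getD i []).set j v)

-- the 'while i < n and j < n' loop of A (i and j advance together)
def pvLoopA (arr : List Int) (n : Nat) (dpf dps : List (List Int)) (i j : Nat) :
    List (List Int) × List (List Int) :=
  if i < n ∧ j < n then
    let f := max (arr.getD i 0 + pvGet2 dps (i+1) j) (arr.getD j 0 + pvGet2 dps i (j-1))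
    let s := min (pvGet2 dpf (i+1) j) (pvGet2 dpf i (j-1))
    pvLoopA arr n (pvSet2 dpf i j f) (pvSet2 dps i j s) (i+1) (j+1)
  else (dpf, dps)
termination_by n - i

def card2 (arr : List Int) : Int :=
  let n := arr.length
  let dpf := List.replicate n (List.replicate n (0 : Int))
  let dps := List.replicate n (List.replicate n (0 : Int))
  let dpf := (List.range n).foldl (fun t i => pvSet2 t i i (arr.getD i 0)) dpf
  let p := (PySem.List.pyRange 1 (n : Int) 1).foldl
      (fun (p : List (List Int) × List (List Int)) k => pvLoopA arr n p.1 p.2 0 k.toNat)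
      (dpf, dps)
  max (pvGet2 p.1 0 (n-1)) (pvGet2 p.2 0 (n-1))

-- ===== PORT B =====
def card2_alt (arr : List Int) : Int :=
  let n := arr.length
  let total := arr.sum
  let d := arr
  let d := (PySem.List.pyRange 2 ((n : Int) + 1) 1).foldl (fun d len =>
      (List.range (n - len.toNat + 1)).foldl (fun (d : List Int) i =>
        d.set i (max (arr.getD i 0 - d.getD (i+1) 0)
                     (arr.getD (i + len.toNat - 1) 0 - d.getD i 0))) d) d
  let first := PySem.Int.floordiv (total + d.getD 0 0) 2
  max first (total - first)

-- ===== PRECONDITION & SPEC =====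
-- Pre_ excludes only the empty list, on which A raises IndexError.
def Pre_card2 (arr : List Int) : Prop := arr ≠ []
instance (arr : List Int) : Decidable (Pre_card2 arr) := by unfold Pre_card2; infer_instance

def pvWitness_card2 : List Int := [3, -1, 4, 1]

def Spec_card2 (arr : List Int) (out : Int) : Prop := out = card2_alt arr
instance (arr : List Int) (out : Int) : Decidable (Spec_card2 arr out) := by unfold Spec_card2; infer_instance

-- ===== CLAIM (what is proved, stated in full; the proofs are below) =====
def Claim_equal_card2 : Prop := ∀ (arr : List Int), Dom_card2 arr → Pre_card2 arr → Spec_card2 arr (card2 arr)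

-- ===== LEMMAS AND PROOFS =====

-- ---- generic 1-D getD/set lemmas ----
theorem pvGetD_set_self {α : Type} (l : List α) (i : Nat) (v d : α) (h : i < l.length) :
    (l.set i v).getD i d = v := by
  simp [List.getD_eq_getElem?_getD, List.getElem?_set, h]

theorem pvGetD_set_ne {α : Type} (l : List α) {i j : Nat} (v d : α) (h : i ≠ j) :
    (l.set i v).getD j d = l.getD j d := by
  simp [List.getD_eq_getElem?_getD, List.getElem?_set, h]

theorem pvGetD_default {α : Type} (l : List α) {i : Nat} (d : α) (h : l.length ≤ i) :
    l.getD i d = d := by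
  simp [List.getD_eq_getElem?_getD, List.getElem?_eq_none (by omega : l.length ≤ i)]

-- ---- 2-D table lemmas ----
def pvShaped (t : List (List Int)) (n : Nat) : Prop :=
  t.length = n ∧ ∀ r ∈ t, r.length = n

theorem pvShaped_set2 {t : List (List Int)} {n : Nat} (h : pvShaped t n)
    {i : Nat} (hi : i < n) (j : Nat) (v : Int) : pvShaped (pvSet2 t i j v) n := by
  obtain ⟨hl, hr⟩ := h
  have hi' : i < t.length := by omega
  refine ⟨by simpa [pvSet2] using hl, ?_⟩
  intro r hrm
  rcases List.mem_or_eq_of_mem_set hrm with hmem | rfl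
  · exact hr r hmem
  · have hrow : t.getD i [] = t[i] := by
      simp [List.getD_eq_getElem?_getD, List.getElem?_eq_getElem hi']
    rw [List.length_set, hrow]
    exact hr _ (List.getElem_mem hi')

theorem pvGet2_set2_self {t : List (List Int)} {n : Nat} (h : pvShaped t n)
    {i j : Nat} (v : Int) (hi : i < n) (hj : j < n) :
    pvGet2 (pvSet2 t i j v) i j = v := by
  obtain ⟨hl, hr⟩ := h
  have hi' : i < t.length := by omega
  have hrow : t.getD i [] = t[i] := by simp [List.getD_eq_getElem?_getD, List.getElem?_eq_getElem hi']
  have hrl : (t.getD i []).length = n := by rw [hrow]; exact hr _ (List.getElem_mem hi')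
  unfold pvGet2 pvSet2
  rw [pvGetD_set_self _ _ _ _ hi', pvGetD_set_self _ _ _ _ (by omega)]

theorem pvGet2_set2_ne {t : List (List Int)} {i j p q : Nat} (v : Int)
    (h : i ≠ p ∨ j ≠ q) : pvGet2 (pvSet2 t i j v) p q = pvGet2 t p q := by
  unfold pvGet2 pvSet2
  by_cases hip : i = p
  · subst hip
    have hjq : j ≠ q := by tauto
    by_cases hi : i < t.length
    · rw [pvGetD_set_self _ _ _ _ hi, pvGetD_set_ne _ _ _ hjq]
    · have e1 : (t.set i ((t.getD i []).set j v)).getD i [] = [] :=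
        pvGetD_default _ _ (by rw [List.length_set]; omega)
      have e2 : t.getD i [] = [] := pvGetD_default _ _ (by omega)
      rw [e1, e2]
  · rw [pvGetD_set_ne _ _ _ hip]

theorem pvGetD_replicate {α : Type} (n i : Nat) (c d : α) :
    (List.replicate n c).getD i d = if i < n then c else d := by
  by_cases h : i < n
  · rw [if_pos h]
    simp [List.getD_eq_getElem?_getD,
      List.getElem?_eq_getElem (show i < (List.replicate n c).length by simpa using h)]
  · rw [if_neg h]
    exact pvGetD_default _ _ (by simpa using Nat.le_of_not_lt h)

theorem pvGet2_replicate (n p q : Nat) :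
    pvGet2 (List.replicate n (List.replicate n (0 : Int))) p q = 0 := by
  unfold pvGet2
  rw [pvGetD_replicate]
  split_ifs with hp
  · rw [pvGetD_replicate]
    split_ifs <;> rfl
  · simp

theorem pvShaped_replicate (n : Nat) :
    pvShaped (List.replicate n (List.replicate n (0 : Int))) n := by
  constructor
  · simp
  · intro r hr
    rw [List.eq_of_mem_replicate hr]; simp

-- ---- the minimax-difference / first-second score specifications ----
-- optimal score difference (current player minus opponent) on arr[i..j]
def pvD (a : Nat → Int) (i j : Nat) : Int :=
  if j ≤ i then a i
  else max (a i - pvD a (i+1) j) (a j - pvD a i (j-1))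
termination_by j - i
decreasing_by all_goals omega

mutual
-- first-player score on arr[i..j], as A computes it
def pvF (a : Nat → Int) (i j : Nat) : Int :=
  if j ≤ i then a i
  else max (a i + pvS a (i+1) j) (a j + pvS a i (j-1))
termination_by j - i
decreasing_by all_goals omega
-- second-player score on arr[i..j] (0 on singletons, as in A)
def pvS (a : Nat → Int) (i j : Nat) : Int :=
  if j ≤ i then 0
  else min (pvF a (i+1) j) (pvF a i (j-1))
termination_by j - i
decreasing_by all_goals omega
end

theorem pvF_base (a : Nat → Int) (i : Nat) : pvF a i i = a i := by
  rw [pvF, if_pos (le_refl i)]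

theorem pvS_base (a : Nat → Int) (i : Nat) : pvS a i i = 0 := by
  rw [pvS, if_pos (le_refl i)]

theorem pvD_base (a : Nat → Int) (i : Nat) : pvD a i i = a i := by
  rw [pvD, if_pos (le_refl i)]

theorem pvF_step (a : Nat → Int) {i j : Nat} (h : i < j) :
    pvF a i j = max (a i + pvS a (i+1) j) (a j + pvS a i (j-1)) := by
  rw [pvF, if_neg (by omega)]

theorem pvS_step (a : Nat → Int) {i j : Nat} (h : i < j) :
    pvS a i j = min (pvF a (i+1) j) (pvF a i (j-1)) := by
  rw [pvS, if_neg (by omega)]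

theorem pvD_step (a : Nat → Int) {i j : Nat} (h : i < j) :
    pvD a i j = max (a i - pvD a (i+1) j) (a j - pvD a i (j-1)) := by
  rw [pvD, if_neg (by omega)]

def pvISum (a : Nat → Int) (i j : Nat) : Int := ((List.range' i (j + 1 - i)).map a).sum

theorem pvISum_base (a : Nat → Int) (i : Nat) : pvISum a i i = a i := by
  unfold pvISum
  rw [show i + 1 - i = 1 by omega]
  simp

theorem pvISum_head (a : Nat → Int) {i j : Nat} (h : i ≤ j) :
    pvISum a i j = a i + pvISum a (i+1) j := by
  unfold pvISum
  rw [show j + 1 - i = (j - i) + 1 by omega, List.range'_succ,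
      show j + 1 - (i+1) = j - i by omega]
  simp

theorem pvISum_last (a : Nat → Int) {i j : Nat} (h1 : i < j) :
    pvISum a i j = pvISum a i (j-1) + a j := by
  unfold pvISum
  rw [show j + 1 - i = (j - i) + 1 by omega, List.range'_concat,
      show j - 1 + 1 - i = j - i by omega]
  simp [show i + 1 * (j - i) = j by omega, show i + (j - i) = j by omega]

theorem pvFS (a : Nat → Int) : ∀ (g i j : Nat), j - i ≤ g → i ≤ j →
    pvF a i j + pvS a i j = pvISum a i j ∧ pvF a i j - pvS a i j = pvD a i j := by
  intro g
  induction g with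
  | zero =>
    intro i j hg hij
    have hji : j = i := by omega
    rw [hji, pvF_base, pvS_base, pvD_base, pvISum_base]
    constructor <;> ring
  | succ g ih =>
    intro i j hg hij
    by_cases hji : j ≤ i
    · have hji' : j = i := by omega
      rw [hji', pvF_base, pvS_base, pvD_base, pvISum_base]
      constructor <;> ring
    · have hij' : i < j := by omega
      obtain ⟨hsum1, hd1⟩ := ih (i+1) j (by omega) (by omega)
      obtain ⟨hsum2, hd2⟩ := ih i (j-1) (by omega) (by omega)
      have hA : pvISum a i j = a i + pvISum a (i+1) j := pvISum_head a hij
      have hB : pvISum a i j = pvISum a i (j-1) + a j := pvISum_last a hij'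
      rw [pvF_step a hij', pvS_step a hij', pvD_step a hij']
      rcases max_cases (a i + pvS a (i+1) j) (a j + pvS a i (j-1)) with ⟨hm, hm'⟩ | ⟨hm, hm'⟩ <;>
      rcases min_cases (pvF a (i+1) j) (pvF a i (j-1)) with ⟨hn, hn'⟩ | ⟨hn, hn'⟩ <;>
      rcases max_cases (a i - pvD a (i+1) j) (a j - pvD a i (j-1)) with ⟨ho, ho'⟩ | ⟨ho, ho'⟩ <;>
      constructor <;> omega

-- ---- A side: diagonal initialisation ----
def pvDiag (arr : List Int) (m : Nat) (t : List (List Int)) : List (List Int) :=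
  (List.range m).foldl (fun t i => pvSet2 t i i (arr.getD i 0)) t

theorem pvDiag_spec (arr : List Int) {n : Nat} {t : List (List Int)}
    (ht : pvShaped t n) (h0 : ∀ p q, p < n → q < n → pvGet2 t p q = 0) :
    ∀ m, m ≤ n → pvShaped (pvDiag arr m t) n ∧
      ∀ p q, p < n → q < n →
        pvGet2 (pvDiag arr m t) p q = if p = q ∧ p < m then arr.getD p 0 else 0 := by
  intro m
  induction m with
  | zero => intro _; exact ⟨ht, by intro p q hp hq; simpa using h0 p q hp hq⟩
  | succ m ih =>
    intro hm
    obtain ⟨hsh, hget⟩ := ih (by omega)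
    have hstep : pvDiag arr (m+1) t = pvSet2 (pvDiag arr m t) m m (arr.getD m 0) := by
      unfold pvDiag; rw [List.range_succ, List.foldl_append]; rfl
    refine ⟨by rw [hstep]; exact pvShaped_set2 hsh (by omega) _ _, ?_⟩
    intro p q hp hq
    rw [hstep]
    by_cases hpq : p = m ∧ q = m
    · obtain ⟨rfl, rfl⟩ := hpq
      rw [pvGet2_set2_self hsh _ hp hq]
      simp
    · rw [pvGet2_set2_ne _ (by omega), hget p q hp hq]
      split_ifs <;> first | rfl | (exfalso; omega)

-- ---- A side: loop invariants ----
def pvMidA (arr : List Int) (k m : Nat) (dpf dps : List (List Int)) : Prop :=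
  pvShaped dpf arr.length ∧ pvShaped dps arr.length ∧
  ∀ p q, p < arr.length → q < arr.length →
    (pvGet2 dpf p q =
      if p ≤ q ∧ (q + 1 ≤ p + k ∨ (q = p + k ∧ p < m)) then pvF (fun i => arr.getD i 0) p q else 0) ∧
    (pvGet2 dps p q =
      if p < q ∧ (q + 1 ≤ p + k ∨ (q = p + k ∧ p < m)) then pvS (fun i => arr.getD i 0) p q else 0)

theorem pvMidA_read_dps {arr : List Int} {k m : Nat} {dpf dps : List (List Int)}
    (h : pvMidA arr k m dpf dps) {p q : Nat} (hpq : p ≤ q) (hq : q + 1 ≤ p + k)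
    (hqn : q < arr.length) : pvGet2 dps p q = pvS (fun i => arr.getD i 0) p q := by
  obtain ⟨_, _, hg⟩ := h
  rw [(hg p q (by omega) hqn).2]
  by_cases hlt : p < q
  · rw [if_pos ⟨hlt, Or.inl hq⟩]
  · have : p = q := by omega
    subst this
    rw [if_neg (by omega), pvS_base]

theorem pvMidA_read_dpf {arr : List Int} {k m : Nat} {dpf dps : List (List Int)}
    (h : pvMidA arr k m dpf dps) {p q : Nat} (hpq : p ≤ q) (hq : q + 1 ≤ p + k)
    (hqn : q < arr.length) : pvGet2 dpf p q = pvF (fun i => arr.getD i 0) p q := by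
  obtain ⟨_, _, hg⟩ := h
  rw [(hg p q (by omega) hqn).1, if_pos ⟨hpq, Or.inl hq⟩]

def pvInvA (arr : List Int) (k : Nat) (st : List (List Int) × List (List Int)) : Prop :=
  pvShaped st.1 arr.length ∧ pvShaped st.2 arr.length ∧
  ∀ p q, p < arr.length → q < arr.length →
    (pvGet2 st.1 p q =
      if p ≤ q ∧ q ≤ p + k then pvF (fun i => arr.getD i 0) p q else 0) ∧
    (pvGet2 st.2 p q =
      if p < q ∧ q ≤ p + k then pvS (fun i => arr.getD i 0) p q else 0)

theorem pvLoopA_inv (arr : List Int) (k : Nat) (hk : 1 ≤ k) :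
    ∀ (fuel m : Nat) (dpf dps : List (List Int)), arr.length - m ≤ fuel →
      pvMidA arr k m dpf dps →
      pvInvA arr k (pvLoopA arr arr.length dpf dps m (m + k)) := by
  intro fuel
  induction fuel with
  | zero =>
    intro m dpf dps hf hmid
    have hmn : ¬ (m < arr.length ∧ m + k < arr.length) := by omega
    rw [pvLoopA, if_neg hmn]
    obtain ⟨h1, h2, hg⟩ := hmid
    refine ⟨h1, h2, ?_⟩
    intro p q hp hq
    obtain ⟨ha, hb⟩ := hg p q hp hq
    constructor
    · rw [ha]; split_ifs <;> first | rfl | (exfalso; omega)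
    · rw [hb]; split_ifs <;> first | rfl | (exfalso; omega)
  | succ fuel ih =>
    intro m dpf dps hf hmid
    by_cases hmn : m < arr.length ∧ m + k < arr.length
    · rw [pvLoopA, if_pos hmn]
      obtain ⟨hm, hmk⟩ := hmn
      have hr1 : pvGet2 dps (m+1) (m+k) = pvS (fun i => arr.getD i 0) (m+1) (m+k) :=
        pvMidA_read_dps hmid (by omega) (by omega) (by omega)
      have hr2 : pvGet2 dps m (m+k-1) = pvS (fun i => arr.getD i 0) m (m+k-1) :=
        pvMidA_read_dps hmid (by omega) (by omega) (by omega)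
      have hr3 : pvGet2 dpf (m+1) (m+k) = pvF (fun i => arr.getD i 0) (m+1) (m+k) :=
        pvMidA_read_dpf hmid (by omega) (by omega) (by omega)
      have hr4 : pvGet2 dpf m (m+k-1) = pvF (fun i => arr.getD i 0) m (m+k-1) :=
        pvMidA_read_dpf hmid (by omega) (by omega) (by omega)
      obtain ⟨hsf, hss, hg⟩ := hmid
      have hfval : max (arr.getD m 0 + pvGet2 dps (m+1) (m+k))
          (arr.getD (m+k) 0 + pvGet2 dps m (m+k-1)) = pvF (fun i => arr.getD i 0) m (m+k) := by
        rw [hr1, hr2, pvF_step _ (show m < m + k by omega)]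
      have hsval : min (pvGet2 dpf (m+1) (m+k)) (pvGet2 dpf m (m+k-1)) =
          pvS (fun i => arr.getD i 0) m (m+k) := by
        rw [hr3, hr4, pvS_step _ (show m < m + k by omega)]
      have hnext : pvMidA arr k (m+1)
          (pvSet2 dpf m (m+k) (max (arr.getD m 0 + pvGet2 dps (m+1) (m+k))
            (arr.getD (m+k) 0 + pvGet2 dps m (m+k-1))))
          (pvSet2 dps m (m+k) (min (pvGet2 dpf (m+1) (m+k)) (pvGet2 dpf m (m+k-1)))) := by
        refine ⟨pvShaped_set2 hsf (by omega) _ _, pvShaped_set2 hss (by omega) _ _, ?_⟩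
        intro p q hp hq
        by_cases hpq : p = m ∧ q = m + k
        · obtain ⟨rfl, rfl⟩ := hpq
          rw [pvGet2_set2_self hsf _ hp hq, pvGet2_set2_self hss _ hp hq, hfval, hsval]
          rw [if_pos ⟨by omega, Or.inr ⟨rfl, by omega⟩⟩, if_pos ⟨by omega, Or.inr ⟨rfl, by omega⟩⟩]
          exact ⟨rfl, rfl⟩
        · obtain ⟨ha, hb⟩ := hg p q hp hq
          rw [pvGet2_set2_ne _ (by omega), pvGet2_set2_ne _ (by omega), ha, hb]
          constructor
          · split_ifs <;> first | rfl | (exfalso; omega)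
          · split_ifs <;> first | rfl | (exfalso; omega)
      have := ih (m+1) _ _ (by omega) hnext
      simpa [show m + 1 + k = m + k + 1 by omega] using this
    · rw [pvLoopA, if_neg hmn]
      obtain ⟨h1, h2, hg⟩ := hmid
      refine ⟨h1, h2, ?_⟩
      intro p q hp hq
      obtain ⟨ha, hb⟩ := hg p q hp hq
      constructor
      · rw [ha]; split_ifs <;> first | rfl | (exfalso; omega)
      · rw [hb]; split_ifs <;> first | rfl | (exfalso; omega)

def pvOuterA (arr : List Int) (m : Nat) (st : List (List Int) × List (List Int)) :
    List (List Int) × List (List Int) :=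
  (List.range m).foldl (fun p kk => pvLoopA arr arr.length p.1 p.2 0 (kk+1)) st

theorem pvOuterA_spec (arr : List Int) (st : List (List Int) × List (List Int))
    (h0 : pvInvA arr 0 st) : ∀ m, pvInvA arr m (pvOuterA arr m st) := by
  intro m
  induction m with
  | zero => exact h0
  | succ m ih =>
    have hstep : pvOuterA arr (m+1) st =
        pvLoopA arr arr.length (pvOuterA arr m st).1 (pvOuterA arr m st).2 0 (m+1) := by
      unfold pvOuterA; rw [List.range_succ, List.foldl_append]; rfl
    rw [hstep]
    obtain ⟨h1, h2, hg⟩ := ih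
    have hmid : pvMidA arr (m+1) 0 (pvOuterA arr m st).1 (pvOuterA arr m st).2 := by
      refine ⟨h1, h2, ?_⟩
      intro p q hp hq
      obtain ⟨ha, hb⟩ := hg p q hp hq
      constructor
      · rw [ha]; split_ifs <;> first | rfl | (exfalso; omega)
      · rw [hb]; split_ifs <;> first | rfl | (exfalso; omega)
    have := pvLoopA_inv arr (m+1) (by omega) (arr.length) 0 _ _ (by omega) hmid
    simpa using this

theorem card2_eq_FS (arr : List Int) (hne : arr ≠ []) :
    card2 arr = max (pvF (fun i => arr.getD i 0) 0 (arr.length - 1))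
                    (pvS (fun i => arr.getD i 0) 0 (arr.length - 1)) := by
  have hn : 1 ≤ arr.length := List.length_pos_iff.mpr hne
  simp only [card2]
  simp only [PySem.List.pyRange_one, List.foldl_map]
  have hbody : (fun (p : List (List Int) × List (List Int)) (kk : Nat) =>
        pvLoopA arr arr.length p.1 p.2 0 ((1 : Int) + kk).toNat) =
      (fun p kk => pvLoopA arr arr.length p.1 p.2 0 (kk+1)) := by
    funext p kk
    congr 1
    omega
  rw [show ((arr.length : Int) - 1).toNat = arr.length - 1 by omega, hbody]
  have hdiag := pvDiag_spec arr (pvShaped_replicate arr.length)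
      (fun p q _ _ => pvGet2_replicate _ _ _) arr.length (le_refl _)
  have h0 : pvInvA arr 0
      (pvDiag arr arr.length (List.replicate arr.length (List.replicate arr.length 0)),
       List.replicate arr.length (List.replicate arr.length 0)) := by
    refine ⟨hdiag.1, pvShaped_replicate _, ?_⟩
    intro p q hp hq
    constructor
    · rw [show pvGet2 (pvDiag arr arr.length
            (List.replicate arr.length (List.replicate arr.length 0)),
            List.replicate arr.length (List.replicate arr.length 0)).1 p q =
          pvGet2 (pvDiag arr arr.length
            (List.replicate arr.length (List.replicate arr.length 0))) p q from rfl,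
         hdiag.2 p q hp hq]
      split_ifs with h1 h2 h2
      · have hpq : p = q := by omega
        rw [hpq, pvF_base]
      · omega
      · omega
      · rfl
    · rw [show pvGet2 (pvDiag arr arr.length
            (List.replicate arr.length (List.replicate arr.length 0)),
            List.replicate arr.length (List.replicate arr.length 0)).2 p q =
          pvGet2 (List.replicate arr.length (List.replicate arr.length 0)) p q from rfl,
         pvGet2_replicate]
      split_ifs with h1
      · omega
      · rfl
  have hfin := pvOuterA_spec arr _ h0 (arr.length - 1)
  obtain ⟨_, _, hg⟩ := hfin
  obtain ⟨ha, hb⟩ := hg 0 (arr.length - 1) (by omega) (by omega)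
  show max (pvGet2 (pvOuterA arr (arr.length - 1) _).1 0 (arr.length - 1))
        (pvGet2 (pvOuterA arr (arr.length - 1) _).2 0 (arr.length - 1)) = _
  rw [show (List.foldl (fun t i => pvSet2 t i i (arr.getD i 0))
        (List.replicate arr.length (List.replicate arr.length 0)) (List.range arr.length)) =
      pvDiag arr arr.length (List.replicate arr.length (List.replicate arr.length 0)) from rfl]
  rw [ha, hb]
  by_cases h1 : 1 < arr.length
  · rw [if_pos ⟨by omega, by omega⟩, if_pos ⟨by omega, by omega⟩]
  · have : arr.length = 1 := by omega
    rw [if_pos (by omega), if_neg (by omega)]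
    rw [this]
    simp only [show (1:Nat) - 1 = 0 from rfl]
    rw [pvS_base]

-- ---- B side ----
def pvInnerB (arr : List Int) (L m : Nat) (d : List Int) : List Int :=
  (List.range m).foldl (fun (d : List Int) i =>
    d.set i (max (arr.getD i 0 - d.getD (i+1) 0)
                 (arr.getD (i + L - 1) 0 - d.getD i 0))) d

theorem pvInnerB_spec (arr : List Int) (L : Nat) (hL : 2 ≤ L) (hLn : L ≤ arr.length)
    (d : List Int) (hd : d.length = arr.length)
    (hinit : ∀ i, i < arr.length →
      d.getD i 0 = pvD (fun i => arr.getD i 0) i (min (i + L - 2) (arr.length - 1))) :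
    ∀ m, m ≤ arr.length - L + 1 →
      (pvInnerB arr L m d).length = arr.length ∧
      ∀ i, i < arr.length → (pvInnerB arr L m d).getD i 0 =
        if i < m then pvD (fun i => arr.getD i 0) i (i + L - 1)
        else pvD (fun i => arr.getD i 0) i (min (i + L - 2) (arr.length - 1)) := by
  intro m
  induction m with
  | zero =>
    intro _
    exact ⟨hd, by intro i hi; simpa using hinit i hi⟩
  | succ m ih =>
    intro hm
    obtain ⟨hlen, hget⟩ := ih (by omega)
    have hstep : pvInnerB arr L (m+1) d = (pvInnerB arr L m d).set m
        (max (arr.getD m 0 - (pvInnerB arr L m d).getD (m+1) 0)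
             (arr.getD (m + L - 1) 0 - (pvInnerB arr L m d).getD m 0)) := by
      unfold pvInnerB; rw [List.range_succ, List.foldl_append]; rfl
    have hmn : m < arr.length := by omega
    have hm1n : m + 1 < arr.length := by omega
    have hv1 : (pvInnerB arr L m d).getD (m+1) 0 =
        pvD (fun i => arr.getD i 0) (m+1) (m + L - 1) := by
      rw [hget (m+1) hm1n, if_neg (by omega)]
      congr 1
      omega
    have hv2 : (pvInnerB arr L m d).getD m 0 =
        pvD (fun i => arr.getD i 0) m (m + L - 2) := by
      rw [hget m hmn, if_neg (by omega)]
      congr 1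
      omega
    refine ⟨by rw [hstep, List.length_set, hlen], ?_⟩
    intro i hi
    rw [hstep]
    by_cases him : i = m
    · subst him
      rw [pvGetD_set_self _ _ _ _ (by omega), hv1, hv2, if_pos (by omega)]
      rw [pvD_step _ (show i < i + L - 1 by omega), show i + L - 1 - 1 = i + L - 2 by omega]
    · rw [pvGetD_set_ne _ _ _ (by omega : m ≠ i), hget i hi]
      split_ifs <;> first | rfl | (exfalso; omega)

def pvOuterB (arr : List Int) (t : Nat) (d : List Int) : List Int :=
  (List.range t).foldl (fun d kk => pvInnerB arr (kk+2) (arr.length - (kk+2) + 1) d) d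

theorem pvOuterB_spec (arr : List Int) (hne : arr ≠ []) :
    ∀ t, t ≤ arr.length - 1 →
      (pvOuterB arr t arr).length = arr.length ∧
      ∀ i, i < arr.length → (pvOuterB arr t arr).getD i 0 =
        pvD (fun i => arr.getD i 0) i (min (i + t) (arr.length - 1)) := by
  have hn : 1 ≤ arr.length := List.length_pos_iff.mpr hne
  intro t
  induction t with
  | zero =>
    intro _
    refine ⟨rfl, ?_⟩
    intro i hi
    show arr.getD i 0 = _
    rw [show min (i + 0) (arr.length - 1) = i by omega, pvD_base]
  | succ t ih =>
    intro ht
    obtain ⟨hlen, hget⟩ := ih (by omega)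
    have hstep : pvOuterB arr (t+1) arr =
        pvInnerB arr (t+2) (arr.length - (t+2) + 1) (pvOuterB arr t arr) := by
      unfold pvOuterB; rw [List.range_succ, List.foldl_append]; rfl
    have hinner := pvInnerB_spec arr (t+2) (by omega) (by omega) (pvOuterB arr t arr) hlen
      (by
        intro i hi
        rw [hget i hi]
        congr 1 <;> omega)
      (arr.length - (t+2) + 1) (le_refl _)
    refine ⟨by rw [hstep]; exact hinner.1, ?_⟩
    intro i hi
    rw [hstep, hinner.2 i hi]
    split_ifs with hsm
    · congr 1
      omega
    · congr 1
      omega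

theorem pvSum_eq (arr : List Int) (hne : arr ≠ []) :
    arr.sum = pvISum (fun i => arr.getD i 0) 0 (arr.length - 1) := by
  have hn : 1 ≤ arr.length := List.length_pos_iff.mpr hne
  have harr : arr = (List.range' 0 (arr.length - 1 + 1 - 0)).map (fun i => arr.getD i 0) := by
    apply List.ext_getElem
    · simp
      omega
    · intro i h1 h2
      simp [List.getD_eq_getElem?_getD, List.getElem?_eq_getElem h1]
  conv_lhs => rw [harr]
  rfl

theorem card2_alt_eq (arr : List Int) (hne : arr ≠ []) :
    card2_alt arr =
      max (PySem.Int.floordiv (arr.sum + pvD (fun i => arr.getD i 0) 0 (arr.length - 1)) 2)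
          (arr.sum - PySem.Int.floordiv (arr.sum + pvD (fun i => arr.getD i 0) 0 (arr.length - 1)) 2) := by
  have hn : 1 ≤ arr.length := List.length_pos_iff.mpr hne
  simp only [card2_alt]
  simp only [PySem.List.pyRange_one, List.foldl_map]
  have hbody : (fun (d : List Int) (kk : Nat) =>
        (List.range (arr.length - ((2 : Int) + kk).toNat + 1)).foldl
          (fun (d : List Int) i =>
            d.set i (max (arr.getD i 0 - d.getD (i+1) 0)
                         (arr.getD (i + ((2 : Int) + kk).toNat - 1) 0 - d.getD i 0))) d) =
      (fun d kk => pvInnerB arr (kk+2) (arr.length - (kk+2) + 1) d) := by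
    funext d kk
    have h2 : ((2 : Int) + kk).toNat = kk + 2 := by omega
    rw [h2]
    rfl
  rw [show ((arr.length : Int) + 1 - 2).toNat = arr.length - 1 by omega, hbody]
  have hfin := (pvOuterB_spec arr hne (arr.length - 1) (le_refl _)).2 0 (by omega)
  rw [show (List.foldl (fun d kk => pvInnerB arr (kk + 2) (arr.length - (kk + 2) + 1) d) arr
        (List.range (arr.length - 1))) = pvOuterB arr (arr.length - 1) arr from rfl]
  rw [hfin, show min (0 + (arr.length - 1)) (arr.length - 1) = arr.length - 1 by omega]

-- ===== VERDICT (by name: the statement is the Claim_ definition above) =====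
theorem card2_spec : Claim_equal_card2 := by
  intro arr _ hpre
  unfold Spec_card2
  have hne : arr ≠ [] := hpre
  rw [card2_eq_FS arr hne, card2_alt_eq arr hne]
  obtain ⟨hsum, hdiff⟩ := pvFS (fun i => arr.getD i 0) (arr.length) 0 (arr.length - 1)
    (by omega) (by omega)
  rw [← pvSum_eq arr hne] at hsum
  have h2F : arr.sum + pvD (fun i => arr.getD i 0) 0 (arr.length - 1) =
      2 * pvF (fun i => arr.getD i 0) 0 (arr.length - 1) := by omega
  rw [h2F, PySem.Int.floordiv_eq_ediv_of_pos (by norm_num),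
      Int.mul_ediv_cancel_left _ (by norm_num)]
  congr 1
  omega
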